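-- pv_equiv track=rewrite | github.com/mchapman87501/mesa_shape_fingerprinter | src/shape_feature_fingerprinter/test/testsupport.py | gen_sd_records
-- ===== SOURCE A (Python) =====
-- def gen_sd_records(inf):
--     buff = []
--     for line in inf:
--         buff.append(line)
--         if (line.strip() == "$$$$"):
--             yield buff
--             buff = []
--     if buff:
--         yield buff
-- ===== SOURCE B (Python) =====
-- from itertools import groupby
--
--
-- def gen_sd_records(inf):
--     counter = 0
--
--     def key(line):
--         nonlocal counter
--         k = counter
--         if line.strip() == "$$$$":
--             counter += 1
--         return k
--
--     for _, group in groupby(inf, key=key):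
--         yield list(group)
-- ===== Notes on version B (the rewrite author's own statement) =====
-- stated objective: idiomatic
-- what changed: Replaces A's explicit buffer append/flush loop with itertools.groupby over a stateful record-counter key (the counter increments after each '$$$$' line), yielding list(group) per key run.
import Mathlib
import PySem

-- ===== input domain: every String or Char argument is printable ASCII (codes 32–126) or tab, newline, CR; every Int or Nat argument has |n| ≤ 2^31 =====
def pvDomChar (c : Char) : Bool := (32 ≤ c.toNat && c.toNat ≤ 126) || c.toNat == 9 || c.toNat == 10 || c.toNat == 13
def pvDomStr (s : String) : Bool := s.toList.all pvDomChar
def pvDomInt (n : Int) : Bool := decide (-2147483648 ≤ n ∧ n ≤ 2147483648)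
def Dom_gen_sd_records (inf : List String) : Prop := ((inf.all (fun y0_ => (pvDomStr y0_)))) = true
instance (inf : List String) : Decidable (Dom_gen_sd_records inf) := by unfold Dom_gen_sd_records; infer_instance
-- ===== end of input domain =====

-- B replaces A's explicit buffer append/flush loop with itertools.groupby over a
-- stateful record-counter key (idiomatic decomposition; same cost, same values).

-- ===== PORT A =====
-- A's loop: buff accumulates lines; on a '$$$$' line the buffer is yielded and reset;
-- a non-empty trailing buffer is yielded at the end.
def pvGenGo (buff : List String) : List String → List (List String)
  | [] => if buff.isEmpty then [] else [buff]
  | l :: ls =>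
    let buff' := buff ++ [l]
    if PySem.Str.strip l = "$$$$" then buff' :: pvGenGo [] ls else pvGenGo buff' ls

def gen_sd_records (inf : List String) : List (List String) := pvGenGo [] inf

-- ===== PORT B =====
-- Source B's key function: each line is paired with the current counter; the counter is
-- incremented AFTER a '$$$$' line so the delimiter stays in its group.
def pvKeyed (c : Int) : List String → List (Int × String)
  | [] => []
  | l :: ls => (c, l) :: pvKeyed (if PySem.Str.strip l = "$$$$" then c + 1 else c) ls

-- itertools.groupby(inf, key) ported as List.splitBy on equal keys, dropping the keys.
def gen_sd_records_alt (inf : List String) : List (List String) :=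
  (List.splitBy (fun a b => a.1 == b.1) (pvKeyed 0 inf)).map (List.map Prod.snd)

-- ===== PRECONDITION & SPEC =====
def Spec_gen_sd_records (inf : List String) (out : List (List String)) : Prop := out = gen_sd_records_alt inf
instance (inf : List String) (out : List (List String)) : Decidable (Spec_gen_sd_records inf out) := by unfold Spec_gen_sd_records; infer_instance

-- ===== CLAIM (what is proved, stated in full; the proofs are below) =====
def Claim_equal_gen_sd_records : Prop := ∀ (inf : List String), Dom_gen_sd_records inf → Spec_gen_sd_records inf (gen_sd_records inf)

-- ===== LEMMAS AND PROOFS =====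

-- Invariant of splitBy.loop over the keyed stream: b is the pending element with key c,
-- the next line's key is c+1 exactly when b is a delimiter, and the accumulated state
-- (run `acc`, finished groups `r`) corresponds to A's buffer / already-yielded records.
theorem pvLoop_eq (ls : List String) : ∀ (c : Int) (b : String) (acc : List (Int × String))
    (r : List (List (Int × String))),
    (List.splitBy.loop (fun a b => a.1 == b.1)
        (pvKeyed (if PySem.Str.strip b = "$$$$" then c + 1 else c) ls) (c, b) acc r).map
        (List.map Prod.snd)
      = r.reverse.map (List.map Prod.snd) ++
        (if PySem.Str.strip b = "$$$$" then
            (acc.reverse.map Prod.snd ++ [b]) :: pvGenGo [] ls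
          else pvGenGo (acc.reverse.map Prod.snd ++ [b]) ls) := by
  induction ls with
  | nil =>
    intro c b acc r
    simp [pvKeyed, List.splitBy.loop, pvGenGo]
  | cons l ls ih =>
    intro c b acc r
    by_cases hb : PySem.Str.strip b = "$$$$"
    · have hne : ((c : Int) == c + 1) = false := by simp
      simp only [hb, if_true, pvKeyed, List.splitBy.loop, hne]
      have := ih (c + 1) l [] (((c, b) :: acc).reverse :: r)
      by_cases hl : PySem.Str.strip l = "$$$$" <;>
        simp only [hl, if_true, if_false] at this ⊢ <;> rw [this] <;>
        simp [pvGenGo, hl]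
    · have heq : ((c : Int) == c) = true := by simp
      simp only [hb, if_false, pvKeyed, List.splitBy.loop, heq]
      rw [ih c l ((c, b) :: acc) r]
      by_cases hl : PySem.Str.strip l = "$$$$" <;>
        simp [hl, pvGenGo]

-- ===== VERDICT (by name: the statement is the Claim_ definition above) =====
theorem gen_sd_records_spec : Claim_equal_gen_sd_records := by
  intro inf _
  unfold Spec_gen_sd_records gen_sd_records gen_sd_records_alt
  cases inf with
  | nil => simp [pvKeyed, pvGenGo, List.splitBy]
  | cons l ls =>
    simp only [pvKeyed, List.splitBy]
    rw [pvLoop_eq ls 0 l [] []]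
    by_cases hl : PySem.Str.strip l = "$$$$" <;> simp [hl, pvGenGo]
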